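-- pv_equiv track=rewrite | github.com/zyshin/nativis | proxyhandler/features.py | _tree_node_length
-- ===== SOURCE A (Python) =====
-- def _tree_node_length(target, tree):
-- 	r = 0
-- 	stack = []
-- 	tt = tree.split()
-- 	for t in tt:
-- 		if t[0] == '(':
-- 			stack.append([t[1:], 0])
-- 		while t[-1] == ')':
-- 			t = t[:-1]
-- 			tag, length = stack.pop()
-- 			if tag == target:
-- 				r += length
-- 			if len(stack) > 0:
-- 				stack[-1][1] += 1
-- 	return r
-- ===== SOURCE B (Python) =====
-- def _tree_node_length(target, tree):
-- 	# Build an explicit tree (build-then-traverse), then recursively sum child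
-- 	# counts of nodes whose tag equals target.
-- 	roots = []
-- 	stack = []  # open frames: (tag, children)
-- 	for tok in tree.split():
-- 		if tok.startswith('('):
-- 			stack.append((tok[1:], []))
-- 		stripped = tok.rstrip(')')
-- 		for _ in range(len(tok) - len(stripped)):
-- 			tag, children = stack.pop()
-- 			node = (tag, children)
-- 			if stack:
-- 				stack[-1][1].append(node)
-- 			else:
-- 				roots.append(node)
--
-- 	def total(nodes):
-- 		s = 0
-- 		for tag, children in nodes:
-- 			if tag == target:
-- 				s += len(children)
-- 			s += total(children)
-- 		return s
--
-- 	return total(roots) + sum(total(children) for _tag, children in stack)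
-- ===== Notes on version B (the rewrite author's own statement) =====
-- stated objective: alternative
-- what changed: A accumulates per-node child counts in-place on the parser stack while scanning; B first parses the tokens into an explicit nested tree of (tag, children) nodes and then makes a second recursive traversal summing len(children) over nodes whose tag equals target.
-- outside the precondition, e.g. on _tree_node_length('a', '(a (b x) )'): A raises IndexError, B returns 1
-- crash fix: On token streams whose closes never outnumber opens but which contain a token made only of ')' characters (e.g. a free-standing ')'), A raises IndexError indexing the emptied token; B parses them as ordinary closes and returns the count. — e.g. on _tree_node_length("a", "(a (b x) )"): A raises IndexError, B returns 1
import Mathlib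
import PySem

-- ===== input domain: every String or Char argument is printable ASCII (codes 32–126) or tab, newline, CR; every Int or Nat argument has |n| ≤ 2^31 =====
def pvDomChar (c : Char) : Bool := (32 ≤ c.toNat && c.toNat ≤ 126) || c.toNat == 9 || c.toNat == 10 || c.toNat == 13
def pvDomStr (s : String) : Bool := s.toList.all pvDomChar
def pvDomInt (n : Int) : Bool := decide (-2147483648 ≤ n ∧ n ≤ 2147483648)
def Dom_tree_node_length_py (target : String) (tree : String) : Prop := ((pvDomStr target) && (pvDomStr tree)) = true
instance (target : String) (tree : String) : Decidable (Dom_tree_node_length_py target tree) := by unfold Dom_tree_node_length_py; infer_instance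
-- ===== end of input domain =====

-- B builds an explicit (tag, children) tree and counts in a second recursive pass,
-- instead of A's in-place child-count accumulation on the parser stack; equal cost (objective: alternative).

-- ===== PORT A =====
-- tokens of `tree.split()`, as lists of code points (shared by both ports and Pre_)
def pyToks (tree : String) : List (List Char) := (PySem.Str.split₀ tree).map String.toList

-- `stack[-1][1] += 1` (no-op when the stack is empty, where Python skips the if)
def aBump (rest : List (List Char × Int)) : List (List Char × Int) :=
  match rest with
  | (ptag, pl) :: rs => (ptag, pl + 1) :: rs
  | [] => []

-- the inner `while t[-1] == ')':` loop; stack top is the list head.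
-- when Python would raise (pop from empty stack / index of emptied token) the guard stops; such inputs are outside Pre_.
def aWhile (target : List Char) (t : List Char) (r : Int) (stack : List (List Char × Int)) :
    Int × List (List Char × Int) :=
  if h : t.getLast? = some ')' then
    match stack with
    | [] => (r, [])
    | (tag, length) :: rest =>
      aWhile target t.dropLast (if tag = target then r + length else r) (aBump rest)
  else (r, stack)
termination_by t.length
decreasing_by
  have ht : t ≠ [] := by rintro rfl; simp at h
  have := List.length_pos_of_ne_nil ht
  simp [List.length_dropLast]; omega

-- body of A's `for t in tt:` loop
def aStep (target : List Char) (st : Int × List (List Char × Int)) (t : List Char) :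
    Int × List (List Char × Int) :=
  aWhile target t st.1 (if t.head? = some '(' then (t.drop 1, (0 : Int)) :: st.2 else st.2)

def tree_node_length_py (target : String) (tree : String) : Int :=
  ((pyToks tree).foldl (aStep target.toList) ((0 : Int), [])).1

-- ===== PORT B =====
mutual
inductive BNode : Type where
  | mk : List Char → BForest → BNode
inductive BForest : Type where
  | nil : BForest
  | cons : BNode → BForest → BForest
end

-- Python list.append on a children/roots list
def BForest.push : BForest → BNode → BForest
  | .nil, n => .cons n .nil
  | .cons m f, n => .cons m (f.push n)

-- len(children)
def BForest.len : BForest → Int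
  | .nil => 0
  | .cons _ f => 1 + f.len

mutual
-- B's recursive `total`
def BNode.total (target : List Char) : BNode → Int
  | .mk tag ch => (if tag = target then ch.len else 0) + BForest.total target ch
def BForest.total (target : List Char) : BForest → Int
  | .nil => 0
  | .cons n f => BNode.total target n + BForest.total target f
end

-- len(tok) - len(tok.rstrip(')')) : number of trailing ')'
def tailClose (t : List Char) : Nat := (t.reverse.takeWhile (fun c => c = ')')).length

-- B's `for _ in range(k): stack.pop() …` close loop; stack top is the list head.
-- (pop from an empty stack raises in Python; the guard stops, such inputs are outside Pre_)
def bPops : Nat → BForest → List (List Char × BForest) → BForest × List (List Char × BForest)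
  | 0, roots, stack => (roots, stack)
  | _ + 1, roots, [] => (roots, [])
  | k + 1, roots, (tag, ch) :: rest =>
    match rest with
    | (pt, pc) :: rs => bPops k roots ((pt, pc.push (BNode.mk tag ch)) :: rs)
    | [] => bPops k (roots.push (BNode.mk tag ch)) []

-- body of B's `for tok in tree.split():` loop
def bStep (st : BForest × List (List Char × BForest)) (t : List Char) :
    BForest × List (List Char × BForest) :=
  bPops (tailClose t) st.1 (if t.head? = some '(' then (t.drop 1, BForest.nil) :: st.2 else st.2)

def tree_node_length_py_alt (target : String) (tree : String) : Int :=
  let st := (pyToks tree).foldl bStep (BForest.nil, [])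
  BForest.total target.toList st.1 + (st.2.map (fun p => BForest.total target.toList p.2)).sum

-- ===== PRECONDITION & SPEC =====
def tokPush (t : List Char) : Nat := if t.head? = some '(' then 1 else 0

-- Pre_ excludes exactly the inputs where Python A raises IndexError: a token consisting
-- only of ')' (indexing the emptied token), or a prefix where closes outnumber opens (pop from empty stack).
def Pre_tree_node_length_py (target : String) (tree : String) : Prop :=
  (∀ t ∈ pyToks tree, t.any (fun c => !(c == ')')) = true) ∧
  (∀ i ∈ List.range ((pyToks tree).length + 1),
    (((pyToks tree).take i).map tailClose).sum ≤ (((pyToks tree).take i).map tokPush).sum)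
instance (target : String) (tree : String) : Decidable (Pre_tree_node_length_py target tree) := by
  unfold Pre_tree_node_length_py; infer_instance

def pvWitness_tree_node_length_py : String × String := ("a", "(a (b x) y)")

-- On token streams whose closes never outnumber opens but which contain a token made only of ')'
-- characters, A raises IndexError indexing the emptied token; B parses them as ordinary closes and returns the count.
def Raises_tree_node_length_py (target : String) (tree : String) : Prop :=
  (∃ t ∈ pyToks tree, t.all (fun c => c == ')') = true) ∧
  (∀ i ∈ List.range ((pyToks tree).length + 1),
    (((pyToks tree).take i).map tailClose).sum ≤ (((pyToks tree).take i).map tokPush).sum)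
instance (target : String) (tree : String) : Decidable (Raises_tree_node_length_py target tree) := by
  unfold Raises_tree_node_length_py; infer_instance

def pvRaiseWitness_tree_node_length_py : String × String := ("a", "(a (b x) )")
def pvRaiseWitnessOut_tree_node_length_py : Int := 1

def Spec_tree_node_length_py (target : String) (tree : String) (out : Int) : Prop :=
  out = tree_node_length_py_alt target tree
instance (target : String) (tree : String) (out : Int) : Decidable (Spec_tree_node_length_py target tree out) := by
  unfold Spec_tree_node_length_py; infer_instance

-- ===== CLAIM (what is proved, stated in full; the proofs are below) =====
def Claim_equal_tree_node_length_py : Prop := ∀ (target : String) (tree : String), Dom_tree_node_length_py target tree → Pre_tree_node_length_py target tree → Spec_tree_node_length_py target tree (tree_node_length_py target tree)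

def Claim_raises_tree_node_length_py : Prop := (∀ (target : String) (tree : String), Dom_tree_node_length_py target tree → Raises_tree_node_length_py target tree → ¬ Pre_tree_node_length_py target tree) ∧ (Dom_tree_node_length_py (pvRaiseWitness_tree_node_length_py.1) (pvRaiseWitness_tree_node_length_py.2) ∧ Raises_tree_node_length_py (pvRaiseWitness_tree_node_length_py.1) (pvRaiseWitness_tree_node_length_py.2) ∧ tree_node_length_py_alt (pvRaiseWitness_tree_node_length_py.1) (pvRaiseWitness_tree_node_length_py.2) = pvRaiseWitnessOut_tree_node_length_py)

-- ===== LEMMAS AND PROOFS =====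

-- A's stack entry corresponding to a B frame: (tag, number of children collected so far)
def projS (stack : List (List Char × BForest)) : List (List Char × Int) :=
  stack.map (fun p => (p.1, p.2.len))

-- A's running r in terms of B's state: total over finished roots plus totals of the
-- children already attached inside every still-open frame
def baseR (target : List Char) (roots : BForest) (stack : List (List Char × BForest)) : Int :=
  BForest.total target roots + (stack.map (fun p => BForest.total target p.2)).sum

-- the effect of A's while loop, counted by number of pops
def popA (target : List Char) : Nat → Int → List (List Char × Int) → Int × List (List Char × Int)
  | 0, r, s => (r, s)
  | _ + 1, r, [] => (r, [])
  | k + 1, r, (tag, length) :: rest =>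
    popA target k (if tag = target then r + length else r) (aBump rest)

lemma len_push (f : BForest) (n : BNode) : (f.push n).len = f.len + 1 := by
  induction f, n using BForest.push.induct with
  | _ => simp [BForest.push, BForest.len, *] <;> ring

lemma total_push (target : List Char) (f : BForest) (n : BNode) :
    (f.push n).total target = f.total target + n.total target := by
  induction f, n using BForest.push.induct with
  | _ => simp [BForest.push, BForest.total, *] <;> ring

lemma tailClose_append_close (xs : List Char) : tailClose (xs ++ [')']) = tailClose xs + 1 := by
  simp [tailClose, List.takeWhile]

lemma tailClose_append_ne (xs : List Char) (x : Char) (hx : x ≠ ')') : tailClose (xs ++ [x]) = 0 := by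
  simp [tailClose, List.takeWhile, hx]

lemma aWhile_eq_popA (target : List Char) :
    ∀ (t : List Char) (r : Int) (s : List (List Char × Int)),
      (∃ c ∈ t, c ≠ ')') → aWhile target t r s = popA target (tailClose t) r s := by
  intro t
  induction t using List.reverseRecOn with
  | nil => intro r s h; simp at h
  | append_singleton xs x ih =>
    intro r s h
    by_cases hx : x = ')'
    · subst hx
      have h' : ∃ c ∈ xs, c ≠ ')' := by
        obtain ⟨c, hc, hne⟩ := h
        rcases List.mem_append.mp hc with h1 | h1
        · exact ⟨c, h1, hne⟩
        · simp at h1; exact absurd h1 hne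
      rw [aWhile.eq_def, tailClose_append_close]
      simp only [List.getLast?_concat]
      rw [dif_pos trivial]
      match s with
      | [] => simp [popA]
      | (tag, length) :: rest =>
        simp only [List.dropLast_concat]
        rw [ih _ _ h']
        simp [popA]
    · rw [aWhile.eq_def, tailClose_append_ne xs x hx]
      simp only [List.getLast?_concat]
      rw [dif_neg (by simpa using hx)]
      simp [popA]

lemma pop_sim (target : List Char) :
    ∀ (k : Nat) (roots : BForest) (stack : List (List Char × BForest)),
      popA target k (baseR target roots stack) (projS stack) =
        (baseR target (bPops k roots stack).1 (bPops k roots stack).2,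
         projS (bPops k roots stack).2) := by
  intro k
  induction k with
  | zero => intro roots stack; simp [popA, bPops]
  | succ k ih =>
    intro roots stack
    match stack with
    | [] => simp [popA, bPops, projS]
    | (tag, ch) :: [] =>
      have hb : (if tag = target then baseR target roots [(tag, ch)] + ch.len
                 else baseR target roots [(tag, ch)])
          = baseR target (roots.push (BNode.mk tag ch)) [] := by
        by_cases h : tag = target <;>
          simp [h, baseR, total_push, BNode.total, BForest.total] <;> ring
      simp only [popA, bPops, aBump, projS, List.map_cons, List.map_nil]
      rw [hb]
      simpa [projS] using ih (roots.push (BNode.mk tag ch)) []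
    | (tag, ch) :: (pt, pc) :: rs =>
      have hb : (if tag = target then baseR target roots ((tag, ch) :: (pt, pc) :: rs) + ch.len
                 else baseR target roots ((tag, ch) :: (pt, pc) :: rs))
          = baseR target roots ((pt, pc.push (BNode.mk tag ch)) :: rs) := by
        by_cases h : tag = target <;>
          simp [h, baseR, total_push, BNode.total, BForest.total] <;> ring
      have hp : ((pt, pc.len + 1) :: rs.map (fun p => (p.1, p.2.len)))
          = projS ((pt, pc.push (BNode.mk tag ch)) :: rs) := by
        simp [projS, len_push]
      simp only [popA, bPops, aBump, projS, List.map_cons]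
      rw [hb, hp]
      simpa [projS] using ih roots ((pt, pc.push (BNode.mk tag ch)) :: rs)

lemma fold_sim (target : List Char) :
    ∀ (tt : List (List Char)) (roots : BForest) (stack : List (List Char × BForest)),
      (∀ t ∈ tt, ∃ c ∈ t, c ≠ ')') →
      tt.foldl (aStep target) (baseR target roots stack, projS stack) =
        (baseR target (tt.foldl bStep (roots, stack)).1 (tt.foldl bStep (roots, stack)).2,
         projS (tt.foldl bStep (roots, stack)).2) := by
  intro tt
  induction tt with
  | nil => intro roots stack _; simp
  | cons t ts ih =>
    intro roots stack h
    have ht : ∃ c ∈ t, c ≠ ')' := h t (List.mem_cons_self ..)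
    have hts : ∀ u ∈ ts, ∃ c ∈ u, c ≠ ')' := fun u hu => h u (List.mem_cons_of_mem _ hu)
    simp only [List.foldl_cons]
    have hstep : aStep target (baseR target roots stack, projS stack) t =
        (baseR target (bStep (roots, stack) t).1 (bStep (roots, stack) t).2,
         projS (bStep (roots, stack) t).2) := by
      unfold aStep bStep
      by_cases hh : t.head? = some '('
      · simp only [hh, if_pos]
        have h1 : ((t.drop 1, (0 : Int)) :: projS stack) = projS ((t.drop 1, BForest.nil) :: stack) := by
          simp [projS, BForest.len]
        have h2 : baseR target roots stack = baseR target roots ((t.drop 1, BForest.nil) :: stack) := by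
          simp [baseR, BForest.total]
        rw [h1, h2, aWhile_eq_popA target t _ _ ht]
        exact pop_sim target _ _ _
      · simp only [hh, if_neg, if_false]
        rw [aWhile_eq_popA target t _ _ ht]
        exact pop_sim target _ _ _
    rw [hstep]
    exact ih _ _ hts

-- ===== VERDICT (by name: the statement is the Claim_ definition above) =====
theorem tree_node_length_py_spec : Claim_equal_tree_node_length_py := by
  intro target tree _ hpre
  have hts : ∀ t ∈ pyToks tree, ∃ c ∈ t, c ≠ ')' := by
    intro t ht
    obtain ⟨c, hc, hb⟩ := List.any_eq_true.mp (hpre.1 t ht)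
    exact ⟨c, hc, by simpa using hb⟩
  unfold Spec_tree_node_length_py tree_node_length_py tree_node_length_py_alt
  have h0 : ((0 : Int), ([] : List (List Char × Int))) =
      (baseR target.toList BForest.nil [], projS []) := by
    simp [baseR, projS, BForest.total]
  rw [h0, fold_sim target.toList (pyToks tree) BForest.nil [] hts]
  rfl

theorem tree_node_length_py_raises : Claim_raises_tree_node_length_py := by
  unfold Claim_raises_tree_node_length_py
  constructor
  · intro target tree _ hr hp
    obtain ⟨⟨t, ht, hall⟩, _⟩ := hr
    obtain ⟨c, hc, hb⟩ := List.any_eq_true.mp (hp.1 t ht)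
    have : c = ')' := by simpa using List.all_eq_true.mp hall c hc
    simp [this] at hb
  · exact ⟨by decide, by decide, by decide⟩

-- consumer self-check of the theorem above: the Raises_ region lies outside Pre_
theorem tree_node_length_py_raises_ok : ∀ (target : String) (tree : String),
    Dom_tree_node_length_py target tree → Raises_tree_node_length_py target tree →
      ¬ Pre_tree_node_length_py target tree :=
  tree_node_length_py_raises.1
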